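-- pv_equiv track=rewrite | github.com/Anubhx/TCS_CODEVITA- | BlockExtractionCode.py | find_dependencies
-- ===== SOURCE A (Python) =====
-- def find_dependencies(blocks, N, M, target):
--     """Find all blocks that need to be removed to reach the target block."""
--     target_coords = blocks[target]
--     target_columns = set(j for i, j in target_coords)
--
--     # Find all blocks that overlap the target's columns
--     blocks_to_remove = set()
--     for block_num, coords in blocks.items():
--         if block_num == target:
--             continue
--
--         block_columns = set(j for i, j in coords)
--         if target_columns & block_columns:  # Check if columns overlap
--             blocks_to_remove.add(block_num)
--
--     return len(blocks_to_remove)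
-- ===== SOURCE B (Python) =====
-- def find_dependencies(blocks, N, M, target):
--     """Find all blocks that need to be removed to reach the target block."""
--     target_columns = set(j for i, j in blocks[target])
--
--     # Inverted index: column -> set of block numbers occupying it
--     col_to_blocks = {}
--     for block_num, coords in blocks.items():
--         if block_num == target:
--             continue
--         for i, j in coords:
--             col_to_blocks.setdefault(j, set()).add(block_num)
--
--     # Union the index entries over the target's columns
--     result = set()
--     for col in target_columns:
--         result |= col_to_blocks.get(col, set())
--     return len(result)
-- ===== Notes on version B (the rewrite author's own statement) =====
-- stated objective: alternative
-- what changed: Replaces the per-block column-set intersection loop by an inverted index (column -> set of block numbers) built in one pass over all coordinates, then unions index entries over the target's columns.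
import Mathlib
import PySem

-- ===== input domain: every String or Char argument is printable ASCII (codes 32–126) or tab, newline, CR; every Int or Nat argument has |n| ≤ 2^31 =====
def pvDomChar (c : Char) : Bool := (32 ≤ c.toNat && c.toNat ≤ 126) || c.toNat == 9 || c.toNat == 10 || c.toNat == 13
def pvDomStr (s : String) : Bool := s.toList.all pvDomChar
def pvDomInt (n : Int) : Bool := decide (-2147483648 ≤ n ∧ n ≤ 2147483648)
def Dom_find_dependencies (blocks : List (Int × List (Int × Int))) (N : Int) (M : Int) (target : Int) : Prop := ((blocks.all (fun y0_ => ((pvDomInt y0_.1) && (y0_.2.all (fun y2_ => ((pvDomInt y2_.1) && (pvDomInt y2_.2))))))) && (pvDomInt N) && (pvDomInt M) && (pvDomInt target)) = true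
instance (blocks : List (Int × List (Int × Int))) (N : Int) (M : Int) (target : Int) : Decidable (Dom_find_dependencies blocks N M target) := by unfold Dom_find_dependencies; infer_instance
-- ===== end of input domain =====

-- B replaces A's per-block column-set intersection by an inverted column->blocks index; same result, alternative structure.


-- ===== PORT A =====
-- literal transliteration of A: target columns as a set, then one loop over blocks.items()
-- adding block_num whenever the column-set intersection is non-empty (Python truthiness of a set).
def find_dependencies (blocks : List (Int × List (Int × Int))) (N : Int) (M : Int) (target : Int) : Int :=
  let target_coords := ((PySem.Dict.mk blocks).get? target).getD []   -- blocks[target]; KeyError excluded by Pre_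
  let target_columns : PySem.Set Int := PySem.Set.ofList (target_coords.map (·.2))
  let blocks_to_remove : PySem.Set Int :=
    blocks.foldl (fun s p =>
      if p.1 == target then s
      else if PySem.Set.inter target_columns (PySem.Set.ofList (p.2.map (·.2))) ≠ [] then
        PySem.Set.add s p.1
      else s) PySem.Set.empty
  (blocks_to_remove.length : Int)

-- ===== PORT B =====
-- transliteration of Source B: build the inverted index col -> set of block numbers, then union over target columns.
def find_dependencies_alt (blocks : List (Int × List (Int × Int))) (N : Int) (M : Int) (target : Int) : Int :=
  let target_columns : PySem.Set Int :=
    PySem.Set.ofList ((((PySem.Dict.mk blocks).get? target).getD []).map (·.2))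
  let col_to_blocks : PySem.Dict Int (PySem.Set Int) :=
    blocks.foldl (fun d p =>
      if p.1 == target then d
      else p.2.foldl (fun d c => d.modify c.2 PySem.Set.empty (fun s => PySem.Set.add s p.1)) d)
      PySem.Dict.empty
  let result : PySem.Set Int :=
    target_columns.foldl (fun r col => PySem.Set.union r (col_to_blocks.getD col PySem.Set.empty))
      PySem.Set.empty
  (result.length : Int)

-- ===== PRECONDITION & SPEC =====
-- Pre_ excludes exactly the inputs where Python's blocks[target] raises KeyError: target must be a key.
def Pre_find_dependencies (blocks : List (Int × List (Int × Int))) (N : Int) (M : Int) (target : Int) : Prop :=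
  ∃ p ∈ blocks, p.1 = target
instance (blocks : List (Int × List (Int × Int))) (N : Int) (M : Int) (target : Int) : Decidable (Pre_find_dependencies blocks N M target) := by unfold Pre_find_dependencies; infer_instance

def pvWitness_find_dependencies : (List (Int × List (Int × Int))) × Int × Int × Int :=
  ([(0, [(0, 0)]), (1, [(1, 0)])], 2, 1, 0)

def Spec_find_dependencies (blocks : List (Int × List (Int × Int))) (N : Int) (M : Int) (target : Int) (out : Int) : Prop := out = find_dependencies_alt blocks N M target
instance (blocks : List (Int × List (Int × Int))) (N : Int) (M : Int) (target : Int) (out : Int) : Decidable (Spec_find_dependencies blocks N M target out) := by unfold Spec_find_dependencies; infer_instance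

-- ===== CLAIM (what is proved, stated in full; the proofs are below) =====
def Claim_equal_find_dependencies : Prop := ∀ (blocks : List (Int × List (Int × Int))) (N : Int) (M : Int) (target : Int), Dom_find_dependencies blocks N M target → Pre_find_dependencies blocks N M target → Spec_find_dependencies blocks N M target (find_dependencies blocks N M target)

-- ===== LEMMAS AND PROOFS =====

-- Membership in A's accumulating set.
theorem memA (blocks : List (Int × List (Int × Int))) (target : Int) (tc : PySem.Set Int)
    (s : PySem.Set Int) (x : Int) :
    x ∈ blocks.foldl (fun s p =>
      if p.1 == target then s
      else if PySem.Set.inter tc (PySem.Set.ofList (p.2.map (·.2))) ≠ [] then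
        PySem.Set.add s p.1
      else s) s ↔
    x ∈ s ∨ ∃ p ∈ blocks, p.1 ≠ target ∧
      PySem.Set.inter tc (PySem.Set.ofList (p.2.map (·.2))) ≠ [] ∧ x = p.1 := by
  induction blocks generalizing s with
  | nil => simp
  | cons q qs ih =>
    simp only [List.foldl_cons, ih, List.mem_cons]
    by_cases hq : q.1 = target
    · simp only [beq_iff_eq, hq, if_true]
      constructor
      · rintro (h | ⟨p, hp, h⟩)
        · exact Or.inl h
        · exact Or.inr ⟨p, Or.inr hp, h⟩
      · rintro (h | ⟨p, rfl | hp, h⟩)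
        · exact Or.inl h
        · exact absurd hq h.1
        · exact Or.inr ⟨p, hp, h⟩
    · simp only [beq_iff_eq, hq, if_false]
      by_cases hint : PySem.Set.inter tc (PySem.Set.ofList (q.2.map (·.2))) ≠ []
      · rw [if_pos hint]
        simp only [PySem.Set.mem_add]
        constructor
        · rintro (⟨h | h⟩ | ⟨p, hp, h⟩)
          · exact Or.inl h
          · exact Or.inr ⟨q, Or.inl rfl, hq, hint, h⟩
          · exact Or.inr ⟨p, Or.inr hp, h⟩
        · rintro (h | ⟨p, rfl | hp, h⟩)
          · exact Or.inl (Or.inl h)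
          · exact Or.inl (Or.inr h.2.2)
          · exact Or.inr ⟨p, hp, h⟩
      · rw [if_neg hint]
        constructor
        · rintro (h | ⟨p, hp, h⟩)
          · exact Or.inl h
          · exact Or.inr ⟨p, Or.inr hp, h⟩
        · rintro (h | ⟨p, rfl | hp, h⟩)
          · exact Or.inl h
          · exact absurd h.2.1 hint
          · exact Or.inr ⟨p, hp, h⟩

theorem nodupA (blocks : List (Int × List (Int × Int))) (target : Int) (tc : PySem.Set Int)
    (s : PySem.Set Int) (hs : s.Nodup) :
    (blocks.foldl (fun s p =>
      if p.1 == target then s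
      else if PySem.Set.inter tc (PySem.Set.ofList (p.2.map (·.2))) ≠ [] then
        PySem.Set.add s p.1
      else s) s).Nodup := by
  induction blocks generalizing s with
  | nil => exact hs
  | cons q qs ih =>
    simp only [List.foldl_cons]
    apply ih
    split_ifs
    · exact hs
    · exact PySem.Set.nodup_add _ _ hs
    · exact hs

-- Membership in the inner (per-coords) index-building fold of B.
theorem memB_inner (coords : List (Int × Int)) (bn : Int)
    (d : PySem.Dict Int (PySem.Set Int)) (j x : Int) :
    x ∈ (coords.foldl (fun d c => d.modify c.2 PySem.Set.empty (fun s => PySem.Set.add s bn)) d).getD j PySem.Set.empty ↔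
    x ∈ d.getD j PySem.Set.empty ∨ (x = bn ∧ ∃ c ∈ coords, c.2 = j) := by
  induction coords generalizing d with
  | nil => simp
  | cons c cs ih =>
    simp only [List.foldl_cons, ih, List.mem_cons]
    rw [PySem.Dict.getD_modify]
    by_cases hc : j = c.2
    · subst hc
      rw [if_pos rfl]
      simp only [PySem.Set.mem_add]
      constructor
      · rintro (⟨h | rfl⟩ | ⟨rfl, e, he, hej⟩)
        · exact Or.inl h
        · exact Or.inr ⟨rfl, c, Or.inl rfl, rfl⟩
        · exact Or.inr ⟨rfl, e, Or.inr he, hej⟩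
      · rintro (h | ⟨rfl, e, rfl | he, hej⟩)
        · exact Or.inl (Or.inl h)
        · exact Or.inl (Or.inr rfl)
        · exact Or.inr ⟨rfl, e, he, hej⟩
    · rw [if_neg hc]
      constructor
      · rintro (h | ⟨rfl, e, he, hej⟩)
        · exact Or.inl h
        · exact Or.inr ⟨rfl, e, Or.inr he, hej⟩
      · rintro (h | ⟨rfl, e, rfl | he, hej⟩)
        · exact Or.inl h
        · exact absurd hej.symm hc
        · exact Or.inr ⟨rfl, e, he, hej⟩

-- Membership in the full inverted index of B.
theorem memB_idx (blocks : List (Int × List (Int × Int))) (target : Int)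
    (d : PySem.Dict Int (PySem.Set Int)) (j x : Int) :
    x ∈ (blocks.foldl (fun d p =>
      if p.1 == target then d
      else p.2.foldl (fun d c => d.modify c.2 PySem.Set.empty (fun s => PySem.Set.add s p.1)) d) d).getD j PySem.Set.empty ↔
    x ∈ d.getD j PySem.Set.empty ∨ ∃ p ∈ blocks, p.1 ≠ target ∧ x = p.1 ∧ ∃ c ∈ p.2, c.2 = j := by
  induction blocks generalizing d with
  | nil => simp
  | cons q qs ih =>
    simp only [List.foldl_cons, ih, List.mem_cons]
    by_cases hq : q.1 = target
    · simp only [beq_iff_eq, hq, if_true]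
      constructor
      · rintro (h | ⟨p, hp, h⟩)
        · exact Or.inl h
        · exact Or.inr ⟨p, Or.inr hp, h⟩
      · rintro (h | ⟨p, rfl | hp, h⟩)
        · exact Or.inl h
        · exact absurd hq h.1
        · exact Or.inr ⟨p, hp, h⟩
    · simp only [beq_iff_eq, hq, if_false, memB_inner]
      constructor
      · rintro (⟨h | ⟨rfl, c, hc, hcj⟩⟩ | ⟨p, hp, h⟩)
        · exact Or.inl h
        · exact Or.inr ⟨q, Or.inl rfl, hq, rfl, c, hc, hcj⟩
        · exact Or.inr ⟨p, Or.inr hp, h⟩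
      · rintro (h | ⟨p, rfl | hp, h⟩)
        · exact Or.inl (Or.inl h)
        · exact Or.inl (Or.inr ⟨h.2.1, h.2.2⟩)
        · exact Or.inr ⟨p, hp, h⟩

-- Membership in B's final union fold.
theorem memB_result (cols : List Int) (idx : PySem.Dict Int (PySem.Set Int))
    (r : PySem.Set Int) (x : Int) :
    x ∈ cols.foldl (fun r col => PySem.Set.union r (idx.getD col PySem.Set.empty)) r ↔
    x ∈ r ∨ ∃ col ∈ cols, x ∈ idx.getD col PySem.Set.empty := by
  induction cols generalizing r with
  | nil => simp
  | cons c cs ih =>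
    simp only [List.foldl_cons, ih, PySem.Set.mem_union, List.mem_cons]
    constructor
    · rintro (⟨h | h⟩ | ⟨col, hc, h⟩)
      · exact Or.inl h
      · exact Or.inr ⟨c, Or.inl rfl, h⟩
      · exact Or.inr ⟨col, Or.inr hc, h⟩
    · rintro (h | ⟨col, rfl | hc, h⟩)
      · exact Or.inl (Or.inl h)
      · exact Or.inl (Or.inr h)
      · exact Or.inr ⟨col, hc, h⟩

theorem nodupB_result (cols : List Int) (idx : PySem.Dict Int (PySem.Set Int))
    (r : PySem.Set Int) (hr : r.Nodup) :
    (cols.foldl (fun r col => PySem.Set.union r (idx.getD col PySem.Set.empty)) r).Nodup := by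
  induction cols generalizing r with
  | nil => exact hr
  | cons c cs ih =>
    exact ih _ (PySem.Set.nodup_union _ _ hr)

-- Non-empty set intersection ↔ a shared element.
theorem inter_ne_nil_iff (s t : PySem.Set Int) :
    PySem.Set.inter s t ≠ [] ↔ ∃ y ∈ s, y ∈ t := by
  constructor
  · intro h
    rcases List.exists_mem_of_ne_nil _ h with ⟨y, hy⟩
    rw [PySem.Set.mem_inter] at hy
    exact ⟨y, hy.1, hy.2⟩
  · rintro ⟨y, h1, h2⟩ hnil
    have hm : y ∈ PySem.Set.inter s t := by rw [PySem.Set.mem_inter]; exact ⟨h1, h2⟩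
    rw [hnil] at hm
    simp at hm

-- ===== VERDICT (by name: the statement is the Claim_ definition above) =====
theorem find_dependencies_spec : Claim_equal_find_dependencies := by
  intro blocks N M target _ _
  simp only [Spec_find_dependencies, find_dependencies, find_dependencies_alt]
  congr 1
  refine List.Perm.length_eq ((List.perm_ext_iff_of_nodup ?_ ?_).mpr ?_)
  · exact nodupA _ _ _ _ List.nodup_nil
  · exact nodupB_result _ _ _ List.nodup_nil
  · intro x
    rw [memA, memB_result]
    constructor
    · rintro (h | ⟨p, hp, hpt, hint, rfl⟩)
      · exact absurd h (by simp)
      · rcases (inter_ne_nil_iff _ _).mp hint with ⟨y, hy1, hy2⟩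
        rw [PySem.Set.mem_ofList, List.mem_map] at hy2
        rcases hy2 with ⟨c, hc, rfl⟩
        exact Or.inr ⟨c.2, hy1, (memB_idx _ _ _ _ _).mpr (Or.inr ⟨p, hp, hpt, rfl, c, hc, rfl⟩)⟩
    · rintro (h | ⟨col, hcol, hx⟩)
      · exact absurd h (by simp)
      · rcases (memB_idx _ _ _ _ _).mp hx with h | ⟨p, hp, hpt, rfl, c, hc, rfl⟩
        · rw [PySem.Dict.getD_empty] at h
          exact absurd h (by simp)
        · refine Or.inr ⟨p, hp, hpt, ?_, rfl⟩
          apply (inter_ne_nil_iff _ _).mpr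
          exact ⟨c.2, hcol, (PySem.Set.mem_ofList _ _).mpr (List.mem_map.mpr ⟨c, hc, rfl⟩)⟩
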